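-- pv_equiv track=rewrite | github.com/pypi-data/pypi-mirror-362 | packages/wf2wf/wf2wf-1.1.0.tar.gz/wf2wf-1.1.0/wf2wf/importers/wdl.py | _convert_wdl_type
-- ===== SOURCE A (Python) =====
-- def _convert_wdl_type(wdl_type: str) -> str:
--     """Convert WDL type to IR type."""
--     type_mapping = {
--         "String": "string",
--         "Int": "int",
--         "Float": "float",
--         "Boolean": "boolean",
--         "File": "File",
--         "Array": "array",
--         "Map": "record",
--         "Object": "record",
--     }
--
--     # Handle array types
--     if wdl_type.startswith("Array[") and wdl_type.endswith("]"):
--         inner_type = wdl_type[6:-1]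
--         inner_ir_type = _convert_wdl_type(inner_type)
--         return f"{inner_ir_type}[]"  # Use the format that TypeSpec.parse expects
--
--     # Handle optional types
--     if wdl_type.endswith("?"):
--         base_type = wdl_type[:-1]
--         return _convert_wdl_type(base_type)
--
--     return type_mapping.get(wdl_type, "string")
-- ===== SOURCE B (Python) =====
-- def _convert_wdl_type(wdl_type: str) -> str:
--     """Convert WDL type to IR type (two-pointer: shrink a window of the original
--     string instead of recursing on slices; count array depth)."""
--     type_mapping = {
--         "String": "string",
--         "Int": "int",
--         "Float": "float",
--         "Boolean": "boolean",
--         "File": "File",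
--         "Array": "array",
--         "Map": "record",
--         "Object": "record",
--     }
--     s = wdl_type
--     lo, hi, depth = 0, len(s), 0
--     while True:
--         # a window that both starts with "Array[" and ends with "]" has length >= 7
--         if hi - lo >= 7 and s[lo:lo + 6] == "Array[" and s[hi - 1] == "]":
--             lo += 6
--             hi -= 1
--             depth += 1
--         elif lo < hi and s[hi - 1] == "?":
--             hi -= 1
--         else:
--             break
--     return type_mapping.get(s[lo:hi], "string") + "[]" * depth
-- ===== Notes on version B (the rewrite author's own statement) =====
-- stated objective: alternative
-- what changed: Replaced A's recursion on freshly-sliced strings by a two-pointer window (lo, hi) into the original string with an array-depth counter: the loop moves indices instead of rebuilding strings, then does one mapping lookup on the final window and appends one bracket pair per array level.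
import Mathlib
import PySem

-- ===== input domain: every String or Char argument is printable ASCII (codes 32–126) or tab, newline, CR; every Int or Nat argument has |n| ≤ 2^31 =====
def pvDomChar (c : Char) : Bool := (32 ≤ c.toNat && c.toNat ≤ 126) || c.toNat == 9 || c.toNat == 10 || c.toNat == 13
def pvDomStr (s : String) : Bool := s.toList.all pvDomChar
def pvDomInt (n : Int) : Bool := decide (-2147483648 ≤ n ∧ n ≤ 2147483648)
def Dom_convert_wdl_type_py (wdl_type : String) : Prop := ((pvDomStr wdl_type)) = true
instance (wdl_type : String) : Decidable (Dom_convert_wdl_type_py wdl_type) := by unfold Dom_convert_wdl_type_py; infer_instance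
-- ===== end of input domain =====

-- B replaces A's recursion on sliced copies by a two-pointer window into the
-- original string plus an array-depth counter (objective: alternative).

-- ===== PORT A =====
-- the dict literal of A, keyed/valued over code-point lists (PySem string ops live on List Char)
def pvTypeMapping : PySem.Dict (List Char) (List Char) :=
  PySem.Dict.ofList
    [("String".toList, "string".toList), ("Int".toList, "int".toList),
     ("Float".toList, "float".toList), ("Boolean".toList, "boolean".toList),
     ("File".toList, "File".toList), ("Array".toList, "array".toList),
     ("Map".toList, "record".toList), ("Object".toList, "record".toList)]

-- A's recursion, step for step, on code points
def pvConvA (s : List Char) : List Char :=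
  if PySem.Chars.startswith s "Array[".toList && PySem.Chars.endswith s "]".toList then
    pvConvA (PySem.Chars.slice s (some 6) (some (-1))) ++ "[]".toList
  else if PySem.Chars.endswith s "?".toList then
    pvConvA (PySem.Chars.slice s none (some (-1)))
  else
    pvTypeMapping.getD s "string".toList
termination_by s.length
decreasing_by
  · have h1 : "Array[".toList <+: s := by
      simp only [Bool.and_eq_true] at *; exact (PySem.Chars.startswith_iff _ _).1 (by tauto)
    have hn : 6 ≤ s.length := by simpa using h1.length_le
    simp [PySem.Chars.slice_eq_listSlice, PySem.List.length_slice]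
    omega
  · rename_i _ h2
    have h3 : "?".toList <:+ s := (PySem.Chars.endswith_iff _ _).1 h2
    have hn : 1 ≤ s.length := by simpa using h3.length_le
    simp [PySem.Chars.slice_eq_listSlice, PySem.List.slice_to_neg_one, List.length_dropLast]
    omega

def convert_wdl_type_py (wdl_type : String) : String :=
  String.ofList (pvConvA wdl_type.toList)

-- ===== PORT B =====
-- B's while loop on the window [lo, hi) of the original char list; the Python
-- indices/slices are in range by the guards (hi - lo ≥ 6, lo < hi), so
-- s[lo:lo+6] / s[lo:hi] port exactly as (s.drop lo).take _ and s[hi-1] as s[hi-1]?.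
def pvGoB (s : List Char) (lo hi depth : Nat) : List Char :=
  if 7 ≤ hi - lo ∧ (s.drop lo).take 6 = "Array[".toList ∧ s[hi - 1]? = some ']' then
    pvGoB s (lo + 6) (hi - 1) (depth + 1)
  else if lo < hi ∧ s[hi - 1]? = some '?' then
    pvGoB s lo (hi - 1) depth
  else
    pvTypeMapping.getD ((s.drop lo).take (hi - lo)) "string".toList
      ++ (List.replicate depth "[]".toList).flatten
termination_by hi - lo
decreasing_by
  · omega
  · omega

def convert_wdl_type_py_alt (wdl_type : String) : String :=
  String.ofList (pvGoB wdl_type.toList 0 wdl_type.toList.length 0)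

-- ===== PRECONDITION & SPEC =====
def Spec_convert_wdl_type_py (wdl_type : String) (out : String) : Prop := out = convert_wdl_type_py_alt wdl_type
instance (wdl_type : String) (out : String) : Decidable (Spec_convert_wdl_type_py wdl_type out) := by unfold Spec_convert_wdl_type_py; infer_instance

-- ===== CLAIM (what is proved, stated in full; the proofs are below) =====
def Claim_equal_convert_wdl_type_py : Prop := ∀ (wdl_type : String), Dom_convert_wdl_type_py wdl_type → Spec_convert_wdl_type_py wdl_type (convert_wdl_type_py wdl_type)

-- ===== LEMMAS AND PROOFS =====

-- the window [lo, hi) as a list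
theorem pv_mid_length (s : List Char) (lo hi : Nat) (_h1 : lo ≤ hi) (h2 : hi ≤ s.length) :
    ((s.drop lo).take (hi - lo)).length = hi - lo := by
  simp; omega

theorem pv_mid_getLast? (s : List Char) (lo hi : Nat) (h0 : lo < hi) (h2 : hi ≤ s.length) :
    ((s.drop lo).take (hi - lo)).getLast? = s[hi - 1]? := by
  rw [List.getLast?_eq_getElem?, pv_mid_length s lo hi (by omega) h2]
  rw [List.getElem?_take_of_lt (by omega), List.getElem?_drop]
  congr 1; omega

theorem pv_endswith_single (l : List Char) (c : Char) :
    PySem.Chars.endswith l [c] = true ↔ l.getLast? = some c := by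
  rw [PySem.Chars.endswith_iff]
  constructor
  · rintro ⟨t, rfl⟩; simp
  · intro h
    rcases List.eq_nil_or_concat l with rfl | ⟨t, x, rfl⟩
    · simp at h
    · simp at h; exact ⟨t, by simp [h]⟩

-- B's array-branch guard equals A's, on the window
theorem pv_condArray (s : List Char) (lo hi : Nat) (h1 : lo ≤ hi) (h2 : hi ≤ s.length) :
    ((PySem.Chars.startswith ((s.drop lo).take (hi - lo)) "Array[".toList &&
      PySem.Chars.endswith ((s.drop lo).take (hi - lo)) "]".toList) = true)
    ↔ (7 ≤ hi - lo ∧ (s.drop lo).take 6 = "Array[".toList ∧ s[hi - 1]? = some ']') := by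
  rw [Bool.and_eq_true, PySem.Chars.startswith_iff, List.prefix_iff_eq_take,
    show ("]".toList) = [']'] from rfl, pv_endswith_single,
    show ("Array[".toList.length) = 6 from rfl]
  constructor
  · rintro ⟨hp, he⟩
    have hlen : 6 ≤ hi - lo := by
      have := congrArg List.length hp
      simp at this
      omega
    have hp' : "Array[".toList = (s.drop lo).take 6 := by
      rw [List.take_take, show min 6 (hi - lo) = 6 by omega] at hp
      exact hp
    have hlen7 : 7 ≤ hi - lo := by
      rcases Nat.lt_or_ge (hi - lo) 7 with h7 | h7
      · have hmid : (s.drop lo).take (hi - lo) = "Array[".toList := by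
          rw [show hi - lo = 6 by omega]; exact hp'.symm
        rw [hmid] at he; simp at he
      · exact h7
    refine ⟨hlen7, hp'.symm, ?_⟩
    rw [← pv_mid_getLast? s lo hi (by omega) h2]; exact he
  · rintro ⟨hlen, hp, he⟩
    refine ⟨?_, ?_⟩
    · rw [List.take_take, show min 6 (hi - lo) = 6 by omega]
      exact hp.symm
    · rw [pv_mid_getLast? s lo hi (by omega) h2]; exact he

-- B's optional-branch guard equals A's, on the window
theorem pv_condOpt (s : List Char) (lo hi : Nat) (h1 : lo ≤ hi) (h2 : hi ≤ s.length) :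
    (PySem.Chars.endswith ((s.drop lo).take (hi - lo)) "?".toList = true)
    ↔ (lo < hi ∧ s[hi - 1]? = some '?') := by
  rw [show ("?".toList) = ['?'] from rfl, pv_endswith_single]
  constructor
  · intro he
    have hne : ((s.drop lo).take (hi - lo)) ≠ [] := by
      intro h; rw [h] at he; simp at he
    have hlt : lo < hi := by
      by_contra h
      exact hne (by simp; omega)
    exact ⟨hlt, by rw [← pv_mid_getLast? s lo hi hlt h2]; exact he⟩
  · rintro ⟨hlt, he⟩
    rw [pv_mid_getLast? s lo hi hlt h2]; exact he

-- A's Array-branch slice of the window is the shrunken window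
theorem pv_slice_array (s : List Char) (lo hi : Nat) (h1 : lo ≤ hi) (h2 : hi ≤ s.length)
    (hlen : 6 ≤ hi - lo) :
    PySem.Chars.slice ((s.drop lo).take (hi - lo)) (some 6) (some (-1))
      = (s.drop (lo + 6)).take (hi - 1 - (lo + 6)) := by
  rw [PySem.Chars.slice_eq_listSlice]
  simp only [PySem.List.slice, PySem.List.clampIdx_neg_one,
    pv_mid_length s lo hi h1 h2]
  simp [PySem.List.clampIdx, List.drop_take, List.take_take]
  rw [show min 6 (hi - lo) = 6 from by omega]
  congr 1
  omega

-- A's optional-branch slice of the window is the shrunken window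
theorem pv_slice_opt (s : List Char) (lo hi : Nat) (h1 : lo < hi) (h2 : hi ≤ s.length) :
    PySem.Chars.slice ((s.drop lo).take (hi - lo)) none (some (-1))
      = (s.drop lo).take (hi - 1 - lo) := by
  rw [PySem.Chars.slice_eq_listSlice, PySem.List.slice_to_neg_one,
    List.dropLast_eq_take, pv_mid_length s lo hi (by omega) h2, List.take_take]
  rw [show min (hi - lo - 1) (hi - lo) = hi - 1 - lo from by omega]

-- loop invariant: the window loop with depth d computes A on the window, then d copies of "[]"
theorem pvGoB_eq_convA (s : List Char) (lo hi : Nat) (d : Nat)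
 :
    lo ≤ hi → hi ≤ s.length →
    pvGoB s lo hi d
      = pvConvA ((s.drop lo).take (hi - lo)) ++ (List.replicate d "[]".toList).flatten := by
  fun_induction pvGoB s lo hi d with
  | case1 lo hi d h ih =>
    intro h1 h2
    rw [ih (by omega) (by omega)]
    conv_rhs => rw [pvConvA]
    rw [if_pos ((pv_condArray s lo hi h1 h2).2 h),
      pv_slice_array s lo hi h1 h2 (by omega)]
    simp [List.replicate_succ, List.append_assoc]
  | case2 lo hi d hA h ih =>
    intro h1 h2
    rw [ih (by omega) (by omega)]
    conv_rhs => rw [pvConvA]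
    rw [if_neg (fun hc => hA ((pv_condArray s lo hi h1 h2).1 hc)),
      if_pos ((pv_condOpt s lo hi h1 h2).2 h),
      pv_slice_opt s lo hi h.1 h2]
  | case3 lo hi d hA hO =>
    intro h1 h2
    rw [pvConvA,
      if_neg (fun hc => hA ((pv_condArray s lo hi h1 h2).1 hc)),
      if_neg (fun hc => hO ((pv_condOpt s lo hi h1 h2).1 hc))]

-- ===== VERDICT (by name: the statement is the Claim_ definition above) =====
theorem convert_wdl_type_py_spec : Claim_equal_convert_wdl_type_py := by
  intro wdl_type _
  unfold Spec_convert_wdl_type_py convert_wdl_type_py convert_wdl_type_py_alt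
  rw [pvGoB_eq_convA _ _ _ _ (by omega) (le_refl _), Nat.sub_zero, List.drop_zero,
    List.take_length]
  simp
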